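-- pv_equiv track=rewrite | github.com/PrinceRaj354/BT_Group_Bootcamp | challenges/challenge_42_alternating_series/alternating_series_42.py | generate_alternating_series
-- ===== SOURCE A (Python) =====
-- def generate_alternating_series(n):
--     if n <= 0:
--         return []
--
--     result = []
--     value = 1
--     sign = 1
--
--     for _ in range(n):
--         result.append(sign * value)
--         value += 4
--         sign *= -1
--
--     return result
-- ===== SOURCE B (Python) =====
-- def generate_alternating_series(n):
--     return [(-1) ** i * (1 + 4 * i) for i in range(n)]
-- ===== Notes on version B (the rewrite author's own statement) =====
-- stated objective: simpler
-- what changed: Replaces the stateful loop carrying running value/sign accumulators by a stateless closed form computing each element directly from its index, (-1)**i * (1 + 4*i).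
import Mathlib
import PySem

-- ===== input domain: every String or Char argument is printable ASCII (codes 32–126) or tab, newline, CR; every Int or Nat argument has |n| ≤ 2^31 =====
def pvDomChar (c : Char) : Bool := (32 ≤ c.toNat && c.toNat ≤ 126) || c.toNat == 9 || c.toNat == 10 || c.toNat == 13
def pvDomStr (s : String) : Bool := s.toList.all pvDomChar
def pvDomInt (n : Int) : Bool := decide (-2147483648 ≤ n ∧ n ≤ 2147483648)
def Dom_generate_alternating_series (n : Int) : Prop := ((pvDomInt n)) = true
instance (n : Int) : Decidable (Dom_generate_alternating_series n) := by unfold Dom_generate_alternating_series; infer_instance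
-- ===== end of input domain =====

-- ===== PORT A =====
-- B replaces the running value/sign accumulators by a closed form per index (objective: simpler).
-- loop body of A: result.append(sign * value); value += 4; sign *= -1
def pvGoA : Nat → Int → Int → List Int
  | 0, _, _ => []
  | k + 1, value, sign => sign * value :: pvGoA k (value + 4) (sign * (-1))

def generate_alternating_series (n : Int) : List Int :=
  if n ≤ 0 then []
  else pvGoA n.toNat 1 1

-- ===== PORT B =====
-- [(-1) ** i * (1 + 4 * i) for i in range(n)]  (i ≥ 0 in range(n), so ^ i.toNat is exact)
def generate_alternating_series_alt (n : Int) : List Int :=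
  (PySem.List.pyRange 0 n 1).map (fun i => ((-1 : Int)) ^ i.toNat * (1 + 4 * i))

-- ===== PRECONDITION & SPEC =====
def Spec_generate_alternating_series (n : Int) (out : List Int) : Prop := out = generate_alternating_series_alt n
instance (n : Int) (out : List Int) : Decidable (Spec_generate_alternating_series n out) := by unfold Spec_generate_alternating_series; infer_instance

-- ===== CLAIM (what is proved, stated in full; the proofs are below) =====
def Claim_equal_generate_alternating_series : Prop := ∀ (n : Int), Dom_generate_alternating_series n → Spec_generate_alternating_series n (generate_alternating_series n)

-- ===== LEMMAS AND PROOFS =====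

-- ===== VERDICT (by name: the statement is the Claim_ definition above) =====
-- closed form of A's accumulator loop
theorem pvGoA_eq (k : Nat) (v s : Int) :
    pvGoA k v s = (List.range k).map (fun i : Nat => s * (-1 : Int) ^ i * (v + 4 * (i : Int))) := by
  induction k generalizing v s with
  | zero => simp [pvGoA]
  | succ k ih =>
      rw [List.range_succ_eq_map]
      simp only [pvGoA, ih, List.map_cons, List.map_map]
      congr 1
      · push_cast; ring
      · apply List.map_congr_left
        intro i _
        simp only [Function.comp, Nat.succ_eq_add_one, pow_succ]
        push_cast
        ring

theorem generate_alternating_series_spec : Claim_equal_generate_alternating_series := by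
  intro n _
  unfold Spec_generate_alternating_series generate_alternating_series generate_alternating_series_alt
  split
  · rw [PySem.List.pyRange_one_eq_nil (by omega), List.map_nil]
  · rw [pvGoA_eq, PySem.List.pyRange_one, List.map_map]
    simp only [sub_zero]
    apply List.map_congr_left
    intro i _
    simp only [Function.comp, zero_add, Int.toNat_natCast]
    ring
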